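-- pv_equiv track=rewrite | github.com/finlaymcnally/RecipeImporter | cookimport/labelstudio/freeform_tasks.py | _segment_ranges
-- ===== SOURCE A (Python) =====
-- def _segment_ranges(
--     total_blocks: int, segment_blocks: int, segment_overlap: int
-- ) -> list[tuple[int, int]]:
--     if segment_blocks <= 0:
--         raise ValueError("segment_blocks must be >= 1")
--     if segment_overlap < 0:
--         raise ValueError("segment_overlap must be >= 0")
--     if segment_overlap >= segment_blocks:
--         raise ValueError("segment_overlap must be smaller than segment_blocks")
--     if total_blocks <= 0:
--         return []
--
--     step = segment_blocks - segment_overlap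
--     ranges: list[tuple[int, int]] = []
--     start = 0
--     while start < total_blocks:
--         end = min(total_blocks, start + segment_blocks)
--         ranges.append((start, end))
--         if end >= total_blocks:
--             break
--         start += step
--     return ranges
-- ===== SOURCE B (Python) =====
-- def _segment_ranges(
--     total_blocks: int, segment_blocks: int, segment_overlap: int
-- ) -> list[tuple[int, int]]:
--     if segment_blocks <= 0:
--         raise ValueError("segment_blocks must be >= 1")
--     if segment_overlap < 0:
--         raise ValueError("segment_overlap must be >= 0")
--     if segment_overlap >= segment_blocks:
--         raise ValueError("segment_overlap must be smaller than segment_blocks")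
--     if total_blocks <= 0:
--         return []
--     step = segment_blocks - segment_overlap
--     # number of steps before a segment reaches the end, in closed form
--     m = max(0, -((segment_blocks - total_blocks) // step))
--     return [(i * step, min(total_blocks, i * step + segment_blocks)) for i in range(m + 1)]
-- ===== Notes on version B (the rewrite author's own statement) =====
-- stated objective: alternative
-- what changed: Replaces the stateful while-loop with a break by a closed-form computation of the segment count (ceiling division) and a single comprehension over range(m+1).
import Mathlib
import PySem

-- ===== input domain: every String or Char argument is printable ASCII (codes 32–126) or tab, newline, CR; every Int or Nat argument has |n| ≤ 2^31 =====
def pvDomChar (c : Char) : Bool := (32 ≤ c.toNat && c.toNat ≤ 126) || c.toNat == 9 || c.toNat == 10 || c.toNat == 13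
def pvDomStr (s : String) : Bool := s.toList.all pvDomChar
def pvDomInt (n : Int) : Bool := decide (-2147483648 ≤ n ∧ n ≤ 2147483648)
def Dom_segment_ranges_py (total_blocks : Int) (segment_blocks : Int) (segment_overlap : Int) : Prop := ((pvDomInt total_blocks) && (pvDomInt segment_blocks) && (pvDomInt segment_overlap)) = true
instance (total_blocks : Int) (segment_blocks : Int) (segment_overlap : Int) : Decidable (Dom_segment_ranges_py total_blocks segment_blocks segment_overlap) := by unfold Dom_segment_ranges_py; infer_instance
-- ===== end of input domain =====

-- B replaces A's stateful while-loop (with break) by a closed-form segment count and one comprehension; same cost, plainer shape.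

-- ===== PORT A =====
-- the while-loop of A; the proof argument 0 < step (guaranteed by A's guards) makes it terminate
def segA_loop (total sb step : Int) (hstep : 0 < step) (start : Int) (acc : List (Int × Int)) : List (Int × Int) :=
  if _h : start < total then
    let e := min total (start + sb)
    let acc' := acc ++ [(start, e)]
    if e ≥ total then acc'
    else segA_loop total sb step hstep (start + step) acc'
  else acc
termination_by (total - start).toNat
decreasing_by omega

def segment_ranges_py (total_blocks : Int) (segment_blocks : Int) (segment_overlap : Int) : List (Int × Int) :=
  if h1 : segment_blocks ≤ 0 then []          -- raise ValueError (excluded by Pre_)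
  else if h2 : segment_overlap < 0 then []    -- raise ValueError (excluded by Pre_)
  else if h3 : segment_overlap ≥ segment_blocks then []  -- raise ValueError (excluded by Pre_)
  else if total_blocks ≤ 0 then []
  else segA_loop total_blocks segment_blocks (segment_blocks - segment_overlap) (by omega) 0 []

-- ===== PORT B =====
def segment_ranges_py_alt (total_blocks : Int) (segment_blocks : Int) (segment_overlap : Int) : List (Int × Int) :=
  if segment_blocks ≤ 0 then []          -- raise ValueError (excluded by Pre_)
  else if segment_overlap < 0 then []    -- raise ValueError (excluded by Pre_)
  else if segment_overlap ≥ segment_blocks then []  -- raise ValueError (excluded by Pre_)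
  else if total_blocks ≤ 0 then []
  else
    let step := segment_blocks - segment_overlap
    let m := max 0 (-(PySem.Int.floordiv (segment_blocks - total_blocks) step))
    (PySem.List.pyRange 0 (m + 1) 1).map
      (fun i => (i * step, min total_blocks (i * step + segment_blocks)))

-- ===== PRECONDITION & SPEC =====
-- Pre_ excludes exactly the inputs on which A raises ValueError (its three guard checks).
def Pre_segment_ranges_py (total_blocks : Int) (segment_blocks : Int) (segment_overlap : Int) : Prop :=
  0 < segment_blocks ∧ 0 ≤ segment_overlap ∧ segment_overlap < segment_blocks
instance (total_blocks : Int) (segment_blocks : Int) (segment_overlap : Int) : Decidable (Pre_segment_ranges_py total_blocks segment_blocks segment_overlap) := by unfold Pre_segment_ranges_py; infer_instance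
def pvWitness_segment_ranges_py : Int × Int × Int := (10, 4, 1)

def Spec_segment_ranges_py (total_blocks : Int) (segment_blocks : Int) (segment_overlap : Int) (out : List (Int × Int)) : Prop := out = segment_ranges_py_alt total_blocks segment_blocks segment_overlap
instance (total_blocks : Int) (segment_blocks : Int) (segment_overlap : Int) (out : List (Int × Int)) : Decidable (Spec_segment_ranges_py total_blocks segment_blocks segment_overlap out) := by unfold Spec_segment_ranges_py; infer_instance

-- ===== CLAIM (what is proved, stated in full; the proofs are below) =====
def Claim_equal_segment_ranges_py : Prop := ∀ (total_blocks : Int) (segment_blocks : Int) (segment_overlap : Int), Dom_segment_ranges_py total_blocks segment_blocks segment_overlap → Pre_segment_ranges_py total_blocks segment_blocks segment_overlap → Spec_segment_ranges_py total_blocks segment_blocks segment_overlap (segment_ranges_py total_blocks segment_blocks segment_overlap)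

-- ===== LEMMAS AND PROOFS =====

-- the loop, started at i*step, appends exactly the closed-form segments for indices i..m
lemma segA_loop_eq (total sb step : Int) (h : 0 < step) (hsb : step ≤ sb) (htot : 0 < total)
    (m : Int) (hm : 0 ≤ m) (hend : total ≤ m * step + sb)
    (hmid : ∀ i, 0 ≤ i → i < m → i * step + sb < total) :
    ∀ n i, (m - i).toNat = n → 0 ≤ i → i ≤ m → ∀ acc,
      segA_loop total sb step h (i * step) acc =
        acc ++ (PySem.List.pyRange i (m + 1) 1).map
          (fun j => (j * step, min total (j * step + sb))) := by
  intro n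
  induction n with
  | zero =>
    intro i hn hi0 him acc
    have hie : i = m := by omega
    subst hie
    have hlt : i * step < total := by
      by_cases h0 : i = 0
      · simpa [h0] using htot
      · have := hmid (i - 1) (by omega) (by omega)
        nlinarith
    rw [segA_loop]
    simp only [hlt, if_true, reduceIte]
    have hmin : min total (i * step + sb) = total := min_eq_left hend
    rw [PySem.List.pyRange_one_cons (by omega), PySem.List.pyRange_one_eq_nil (by omega)]
    simp [hmin]
  | succ n ih =>
    intro i hn hi0 him acc
    have hilt : i < m := by omega
    have hmidi := hmid i hi0 hilt
    have hlt : i * step < total := by nlinarith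
    rw [segA_loop]
    simp only [hlt, if_true, reduceIte]
    have hmin : min total (i * step + sb) = i * step + sb := min_eq_right (le_of_lt hmidi)
    have hnotend : ¬ (min total (i * step + sb) ≥ total) := by omega
    simp only [hmin] at hnotend ⊢
    rw [if_neg hnotend]
    have hsucc : i * step + step = (i + 1) * step := by ring
    rw [hsucc, ih (i + 1) (by omega) (by omega) (by omega)]
    rw [show PySem.List.pyRange i (m + 1) 1 = i :: PySem.List.pyRange (i + 1) (m + 1) 1 from
      PySem.List.pyRange_one_cons (by omega)]
    simp [hmin]

theorem segment_ranges_py_spec : Claim_equal_segment_ranges_py := by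
  intro total sb ov _ hpre
  obtain ⟨hsb, hov0, hovlt⟩ := hpre
  unfold Spec_segment_ranges_py segment_ranges_py segment_ranges_py_alt
  simp only [dif_neg (show ¬ sb ≤ 0 by omega), dif_neg (show ¬ ov < 0 by omega),
    dif_neg (show ¬ ov ≥ sb by omega), if_neg (show ¬ sb ≤ 0 by omega),
    if_neg (show ¬ ov < 0 by omega), if_neg (show ¬ ov ≥ sb by omega)]
  by_cases htot : total ≤ 0
  · rw [if_pos htot, if_pos htot]
  · rw [if_neg htot, if_neg htot]
    have htot' : 0 < total := by omega
    set step := sb - ov with hstepdef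
    have hstep : 0 < step := by omega
    set q := PySem.Int.floordiv (sb - total) step with hq
    have hqe : q = (sb - total) / step := by
      rw [hq, PySem.Int.floordiv_eq_ediv_of_pos hstep]
    have hdm : q * step + (sb - total) % step = sb - total := by
      rw [hqe]; exact Int.ediv_mul_add_emod (sb - total) step
    have hr0 : 0 ≤ (sb - total) % step := Int.emod_nonneg _ (by omega)
    have hrlt : (sb - total) % step < step := Int.emod_lt_of_pos _ hstep
    set m := max 0 (-q) with hmdef
    have hm0 : 0 ≤ m := le_max_left _ _
    have hend : total ≤ m * step + sb := by
      by_cases hc : -q ≤ 0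
      · have hme : m = 0 := by omega
        have : 0 ≤ q * step := mul_nonneg (by omega) (by omega)
        simp [hme]; omega
      · have hme : m = -q := by omega
        rw [hme]; nlinarith [hdm]
    have hmid : ∀ i, 0 ≤ i → i < m → i * step + sb < total := by
      intro i hi0 hilt
      have hme : m = -q := by omega
      have h1 : i * step ≤ (-q - 1) * step :=
        mul_le_mul_of_nonneg_right (by omega) (le_of_lt hstep)
      nlinarith [hdm]
    have := segA_loop_eq total sb step hstep (by omega) htot' m hm0 hend hmid
      (m - 0).toNat 0 rfl (le_refl 0) hm0 []
    simpa using this
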